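-- pv_equiv track=rewrite | github.com/qsdrqs/ai4code_sok_code | code_translation/exp1_code_translation_security/translated_solutions_opus47/Question5/Python/1029.py | convertInt
-- ===== SOURCE A (Python) =====
-- def convertInt(input_val):
--     # Note: The original C code has undefined behavior because `output` is
--     # uninitialized when the loop condition first checks it.
--     # This Python version initializes the list and preserves the loop structure.
--     output = [''] * 9
--     i = 0
--     while i < len(output) and output[i] != '\0':
--         output[i] = chr(input_val % 10 + 48)
--         input_val //= 10
--         i += 1
--     return ''.join(output)
-- ===== SOURCE B (Python) =====
-- def convertInt(input_val):
--     # Only the 9 lowest decimal digits matter and Python's % is a floor-mod,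
--     # so reduce to m = input_val mod 10**9, let str() render it, left-pad
--     # with zeros to width 9 and reverse.
--     return str(input_val % 10**9).zfill(9)[::-1]
-- ===== Notes on version B (the rewrite author's own statement) =====
-- stated objective: alternative
-- what changed: Instead of A's while loop that mutates a nine-slot char buffer while repeatedly dividing a threaded accumulator, B reduces the input modulo ten to the ninth power, delegates digit rendering to the built-in decimal conversion str(), left-pads with zeros to width nine via zfill and reverses the string with a slice.
import Mathlib
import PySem

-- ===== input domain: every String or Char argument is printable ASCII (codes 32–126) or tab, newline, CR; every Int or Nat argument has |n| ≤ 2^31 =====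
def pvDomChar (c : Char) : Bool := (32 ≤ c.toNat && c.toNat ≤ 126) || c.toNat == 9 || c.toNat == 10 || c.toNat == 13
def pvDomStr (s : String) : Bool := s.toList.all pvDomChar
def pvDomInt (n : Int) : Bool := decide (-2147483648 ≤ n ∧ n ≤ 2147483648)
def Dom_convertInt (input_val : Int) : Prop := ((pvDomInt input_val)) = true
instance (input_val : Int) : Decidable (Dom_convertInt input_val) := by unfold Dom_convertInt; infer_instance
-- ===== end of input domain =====

-- B replaces A's digit-by-digit arithmetic loop over a mutable nine-slot buffer with a string
-- pipeline: reduce modulo ten^nine, let str() render the decimal, zero-pad via zfill, reverse (objective: alternative).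

-- ===== PORT A =====
-- the while loop: state is (output, input_val, i); condition 'i < len(output) and output[i] != "\0"'.
-- chr(x) is ported by hand as String.ofList [Char.ofNat x.toNat] (exact here: x is always a digit code 48..57).
def convertIntLoop (output : List String) (input_val : Int) (i : Nat) : List String :=
  if i < output.length ∧ ((PySem.List.pyGet? output (i : Int)).getD "") ≠ "\x00" then
    convertIntLoop
      (output.set i (String.ofList [Char.ofNat (PySem.Int.mod input_val 10 + 48).toNat]))
      (PySem.Int.floordiv input_val 10) (i + 1)
  else output
termination_by output.length - i
decreasing_by simp_all; omega
def convertInt (input_val : Int) : String :=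
  PySem.Str.join "" (convertIntLoop (List.replicate 9 "") input_val 0)

-- ===== PORT B =====
-- return str(input_val % 10**9).zfill(9)[::-1]
def convertInt_alt (input_val : Int) : String :=
  (PySem.Str.slice?
    (PySem.Str.zfill (PySem.Int.toStr (PySem.Int.mod input_val (10 ^ 9))) 9)
    none none (-1)).getD ""

-- ===== PRECONDITION & SPEC =====
def Spec_convertInt (input_val : Int) (out : String) : Prop := out = convertInt_alt input_val
instance (input_val : Int) (out : String) : Decidable (Spec_convertInt input_val out) := by unfold Spec_convertInt; infer_instance

-- ===== CLAIM (what is proved, stated in full; the proofs are below) =====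
def Claim_equal_convertInt : Prop := ∀ (input_val : Int), Dom_convertInt input_val → Spec_convertInt input_val (convertInt input_val)

-- ===== LEMMAS AND PROOFS =====

-- full unrolling of A's loop: it always runs exactly 9 iterations (every slot read is "" ≠ '\0'),
-- and the digit written at position i equals (n // 10^i) % 10 by collapsing the iterated divisions.
theorem convertIntLoop_eq (n : Int) : convertIntLoop ["","","","","","","","",""] n 0 =
    (List.range 9).map (fun i => String.ofList [Char.ofNat (PySem.Int.mod (PySem.Int.floordiv n (10 ^ i)) 10 + 48).toNat]) := by
  have hne : ("\x00" : String) ≠ "" := by decide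
  have t1 : ((OfNat.ofNat 1 : Int)).toNat = 1 := rfl
  have t2 : ((OfNat.ofNat 2 : Int)).toNat = 2 := rfl
  have t3 : ((OfNat.ofNat 3 : Int)).toNat = 3 := rfl
  have t4 : ((OfNat.ofNat 4 : Int)).toNat = 4 := rfl
  have t5 : ((OfNat.ofNat 5 : Int)).toNat = 5 := rfl
  have t6 : ((OfNat.ofNat 6 : Int)).toNat = 6 := rfl
  have t7 : ((OfNat.ofNat 7 : Int)).toNat = 7 := rfl
  have t8 : ((OfNat.ofNat 8 : Int)).toNat = 8 := rfl
  have t9 : ((OfNat.ofNat 9 : Int)).toNat = 9 := rfl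
  rw [convertIntLoop]
  norm_num [PySem.List.pyGet?, PySem.List.pyIdx?, hne, List.set, t1,t2,t3,t4,t5,t6,t7,t8,t9]
  rw [convertIntLoop]
  norm_num [PySem.List.pyGet?, PySem.List.pyIdx?, hne, List.set, t1,t2,t3,t4,t5,t6,t7,t8,t9]
  rw [convertIntLoop]
  norm_num [PySem.List.pyGet?, PySem.List.pyIdx?, hne, List.set, t1,t2,t3,t4,t5,t6,t7,t8,t9]
  rw [convertIntLoop]
  norm_num [PySem.List.pyGet?, PySem.List.pyIdx?, hne, List.set, t1,t2,t3,t4,t5,t6,t7,t8,t9]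
  rw [convertIntLoop]
  norm_num [PySem.List.pyGet?, PySem.List.pyIdx?, hne, List.set, t1,t2,t3,t4,t5,t6,t7,t8,t9]
  rw [convertIntLoop]
  norm_num [PySem.List.pyGet?, PySem.List.pyIdx?, hne, List.set, t1,t2,t3,t4,t5,t6,t7,t8,t9]
  rw [convertIntLoop]
  norm_num [PySem.List.pyGet?, PySem.List.pyIdx?, hne, List.set, t1,t2,t3,t4,t5,t6,t7,t8,t9]
  rw [convertIntLoop]
  norm_num [PySem.List.pyGet?, PySem.List.pyIdx?, hne, List.set, t1,t2,t3,t4,t5,t6,t7,t8,t9]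
  rw [convertIntLoop]
  norm_num [PySem.List.pyGet?, PySem.List.pyIdx?, hne, List.set, t1,t2,t3,t4,t5,t6,t7,t8,t9]
  rw [convertIntLoop]
  norm_num [PySem.List.pyGet?, PySem.List.pyIdx?, hne, List.set, t1,t2,t3,t4,t5,t6,t7,t8,t9]
  norm_num [List.range_succ, Int.ediv_ediv_of_nonneg]

-- Nat.digitChar on a decimal digit is the ASCII character d+48.
theorem digitChar_eq_ofNat (d : Nat) (h : d < 10) : Nat.digitChar d = Char.ofNat (d + 48) := by
  interval_cases d <;> rfl

-- Nat.digitChar never produces a sign character.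
theorem digitChar_ne_sign (d : Nat) : Nat.digitChar d ≠ '+' ∧ Nat.digitChar d ≠ '-' := by
  rcases Nat.lt_or_ge d 16 with h | h
  · interval_cases d <;> exact ⟨by decide, by decide⟩
  · have : Nat.digitChar d = '*' := by
      unfold Nat.digitChar
      rw [if_neg (by omega), if_neg (by omega), if_neg (by omega), if_neg (by omega),
        if_neg (by omega), if_neg (by omega), if_neg (by omega), if_neg (by omega),
        if_neg (by omega), if_neg (by omega), if_neg (by omega), if_neg (by omega),
        if_neg (by omega), if_neg (by omega), if_neg (by omega), if_neg (by omega)]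
    rw [this]; exact ⟨by decide, by decide⟩

-- core's fuel-driven decimal renderer, characterised by Nat.digits.
theorem toDigitsCore_eq_digits : ∀ (f n : Nat) (acc : List Char), n < f →
    Nat.toDigitsCore 10 f n acc =
      (if n = 0 then ['0'] else ((Nat.digits 10 n).map Nat.digitChar).reverse) ++ acc := by
  intro f
  induction f with
  | zero => intro n acc h; omega
  | succ f ih =>
    intro n acc h
    rw [Nat.toDigitsCore]
    by_cases h0 : n / 10 = 0
    · have hn10 : n < 10 := by omega
      simp only [h0, if_pos]
      by_cases hz : n = 0
      · subst hz; simp; rfl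
      · have hd : Nat.digits 10 n = [n % 10] := by
          rw [Nat.digits_def' (by norm_num) (by omega), h0, Nat.digits_zero]
        simp [hz, hd, Nat.mod_eq_of_lt hn10]
    · have hnz : n ≠ 0 := by omega
      simp only [h0, if_false]
      rw [ih (n / 10) _ (by omega), if_neg h0, if_neg hnz,
        Nat.digits_def' (by norm_num : (1:ℕ) < 10) (Nat.pos_of_ne_zero hnz)]
      simp

theorem toDigits_eq_digits (m : Nat) : Nat.toDigits 10 m =
    (if m = 0 then ['0'] else ((Nat.digits 10 m).map Nat.digitChar).reverse) := by
  rw [Nat.toDigits, toDigitsCore_eq_digits (m+1) m [] (by omega), List.append_nil]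

-- zero-padding the digit list of m < 10^e to width e is exactly positionwise digit extraction.
theorem digits_pad (e : Nat) : ∀ m : Nat, m < 10 ^ e →
    (Nat.digits 10 m).map Nat.digitChar ++ List.replicate (e - (Nat.digits 10 m).length) '0' =
      (List.range e).map (fun i => Nat.digitChar (m / 10 ^ i % 10)) := by
  induction e with
  | zero => intro m h; interval_cases m; simp
  | succ e ih =>
    intro m h
    by_cases hz : m = 0
    · subst hz
      have hf : (fun i => Nat.digitChar (0 / 10 ^ i % 10)) = fun _ : Nat => '0' := by
        funext i; simp [Nat.digitChar]
      rw [hf, List.map_const', List.length_range]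
      simp
    · have hpos : 0 < m := Nat.pos_of_ne_zero hz
      rw [Nat.digits_def' (by norm_num : (1:ℕ) < 10) hpos]
      rw [List.range_succ_eq_map]
      have hdiv : m / 10 < 10 ^ e := by
        rw [Nat.div_lt_iff_lt_mul (by norm_num)]
        calc m < 10 ^ (e+1) := h
        _ = 10 ^ e * 10 := by ring
      simp only [List.map_cons, List.map_map, List.length_cons, List.cons_append]
      rw [show e + 1 - ((Nat.digits 10 (m/10)).length + 1) = e - (Nat.digits 10 (m/10)).length by omega]
      rw [ih (m / 10) hdiv]
      congr 1
      · simp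
      · apply List.map_congr_left
        intro i _
        simp only [Function.comp]
        rw [pow_succ', Nat.div_div_eq_div_mul]

-- zfill on a nonempty sign-free word is plain left padding.
theorem zfill_no_sign (cs : List Char) (w : Int) (hne : cs ≠ [])
    (hhd : ∀ c ∈ cs, c ≠ '+' ∧ c ≠ '-') :
    PySem.Chars.zfill cs w = List.replicate (w.toNat - cs.length) '0' ++ cs := by
  unfold PySem.Chars.zfill
  split_ifs with hw
  · rw [show w.toNat - cs.length = 0 by omega]
    simp
  · cases cs with
    | nil => exact absurd rfl hne
    | cons c rest =>
      have hc := hhd c (by simp)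
      show (if c = '+' ∨ c = '-' then c :: (List.replicate (w.toNat - (c :: rest).length) '0' ++ rest)
        else List.replicate (w.toNat - (c :: rest).length) '0' ++ c :: rest) =
        List.replicate (w.toNat - (c :: rest).length) '0' ++ c :: rest
      rw [if_neg (by tauto)]

-- the reversed 9-zfilled decimal rendering of m < 10^9 is positionwise digit extraction.
theorem zfill_reverse_eq (m : Nat) (h : m < 10 ^ 9) :
    (PySem.Chars.zfill (Nat.toDigits 10 m) 9).reverse =
      (List.range 9).map (fun i => Nat.digitChar (m / 10 ^ i % 10)) := by
  have hlen : (Nat.toDigits 10 m).length ≤ 9 := Nat.toDigits_length 10 m 9 (by norm_num) h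
  have hne : Nat.toDigits 10 m ≠ [] := by
    rw [toDigits_eq_digits]; split_ifs with hz
    · simp
    · simp [Nat.digits_ne_nil_iff_ne_zero.mpr hz]
  have hhd : ∀ c ∈ Nat.toDigits 10 m, c ≠ '+' ∧ c ≠ '-' := by
    intro c hc
    rw [toDigits_eq_digits] at hc
    split_ifs at hc with hz
    · simp at hc; subst hc; exact ⟨by decide, by decide⟩
    · rw [List.mem_reverse, List.mem_map] at hc
      obtain ⟨d, _, rfl⟩ := hc
      exact digitChar_ne_sign d
  rw [zfill_no_sign _ _ hne hhd, List.reverse_append, List.reverse_replicate]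
  by_cases hz : m = 0
  · subst hz
    decide
  · rw [toDigits_eq_digits, if_neg hz, List.reverse_reverse]
    rw [show ((9:Int)).toNat = 9 from rfl]
    have hld : ((Nat.digits 10 m).map Nat.digitChar).reverse.length = (Nat.digits 10 m).length := by simp
    rw [hld]
    exact digits_pad 9 m h

-- joining singleton words with the empty separator is just the word characters.
theorem intercalate_nil_singletons (f : Nat → Char) : ∀ r : List Nat,
    ([] : List Char).intercalate (r.map (fun i => [f i])) = r.map f := by
  intro r
  induction r with
  | nil => simp [List.intercalate]
  | cons a t ih =>
    cases t with
    | nil => simp [List.intercalate]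
    | cons b t2 =>
      simp only [List.intercalate, List.map_cons] at ih ⊢
      rw [show List.intersperse ([]:List Char) ([f a] :: [f b] :: List.map (fun i => [f i]) t2)
          = [f a] :: [] :: List.intersperse [] ([f b] :: List.map (fun i => [f i]) t2) from rfl]
      simp_all

-- one digit position: A's arithmetically extracted character equals B's rendered character.
theorem elem_eq (n : Int) (i : Nat) (hi : i < 9) :
    Char.ofNat (PySem.Int.mod (PySem.Int.floordiv n (10 ^ i)) 10 + 48).toNat
      = Nat.digitChar ((PySem.Int.mod n (10 ^ 9)).toNat / 10 ^ i % 10) := by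
  rw [PySem.Int.mod_eq_emod_of_pos (a := n) (by norm_num),
      PySem.Int.floordiv_eq_ediv_of_pos (by positivity),
      PySem.Int.mod_eq_emod_of_pos (by norm_num)]
  have hd : (n / 10 ^ i) % 10 = (((n % 10 ^ 9).toNat / 10 ^ i % 10 : Nat) : Int) := by
    interval_cases i <;> (norm_num; omega)
  have hlt : (n % 10 ^ 9).toNat / 10 ^ i % 10 < 10 := Nat.mod_lt _ (by norm_num)
  rw [hd, digitChar_eq_ofNat _ hlt]
  congr 1

-- ===== VERDICT (by name: the statement is the Claim_ definition above) =====
theorem convertInt_spec : Claim_equal_convertInt := by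
  intro n _
  show convertInt n = convertInt_alt n
  have hp : (0:Int) < 10 ^ 9 := by norm_num
  have hm0 : 0 ≤ PySem.Int.mod n (10 ^ 9) := PySem.Int.mod_nonneg n hp
  have hml : PySem.Int.mod n (10 ^ 9) < 10 ^ 9 := PySem.Int.mod_lt n hp
  unfold convertInt convertInt_alt
  rw [PySem.Str.slice?_none_none_neg_one, Option.getD_some, PySem.Str.toList_zfill,
      PySem.Int.toList_toStr]
  rw [show PySem.Int.toChars (PySem.Int.mod n (10 ^ 9))
      = Nat.toDigits 10 (PySem.Int.mod n (10 ^ 9)).toNat from by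
        rw [PySem.Int.toChars, if_neg (not_lt.mpr hm0)]]
  rw [zfill_reverse_eq (PySem.Int.mod n (10 ^ 9)).toNat (by
        have h9 : ((10:Int) ^ 9) = 1000000000 := by norm_num
        have h9n : (10:Nat) ^ 9 = 1000000000 := by norm_num
        rw [h9] at hml hm0
        rw [h9n, h9]
        omega)]
  rw [show List.replicate 9 ("") = ["","","","","","","","",""] from rfl, convertIntLoop_eq n]
  unfold PySem.Str.join
  congr 1
  rw [show ("" : String).toList = [] from rfl]
  unfold PySem.Chars.join
  rw [List.map_map]
  rw [show (String.toList ∘ fun i : Nat =>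
        String.ofList [Char.ofNat (PySem.Int.mod (PySem.Int.floordiv n (10 ^ i)) 10 + 48).toNat])
      = fun i : Nat => [Char.ofNat (PySem.Int.mod (PySem.Int.floordiv n (10 ^ i)) 10 + 48).toNat]
      from funext fun i => String.toList_ofList]
  rw [intercalate_nil_singletons]
  apply List.map_congr_left
  intro i hi
  exact elem_eq n i (List.mem_range.mp hi)
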